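-- pv_equiv track=rewrite | github.com/CamilaGL/angiographies | angiographies/skeletonisation/orderedthinning.py | getNNeighIndexes
-- ===== SOURCE A (Python) =====
-- def getNNeighIndexes(v, maxlim, n=26, includev=False):
--     '''Get a list with all the indexes of v's 6/18/26 connected neighbourhood unrolled.
--     v is the voxel to which we're computing the neighbourhood (in tuple format).
--     maxlim is the shape of the volume.
--     n is the number of neigbhours we're computing.
--     includev indicates if we want the voxel of interest included in out comprehensive neighbourhood list'''
--     list_max = [x + y for x, y in zip(v, [1,1,1])]
--     list_min = [x - y for x, y in zip(v, [1,1,1])]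
--     neigh_min = [max((line_min, 0)) for line_min in list_min] #make sure the min index is still inside the volume
--     neigh_max = [min((line_max, line_shape-1)) for line_max, line_shape in zip(list_max, maxlim)] #make sure the max index is still inside the volume
--     #now unroll
--     indexes = []
--     for i in range(neigh_min[0], neigh_max[0]+1):
--         for j in range(neigh_min[1], neigh_max[1]+1):
--             for k in range(neigh_min[2], neigh_max[2]+1):
--                 if n == 26:
--                     indexes.append((i,j,k)) #all are valid
--                 elif n == 18:
--                     if (abs(v[0]-i) + abs(v[1]-j) + abs(v[2]-k)) <=2: #can only move in two directions at a time
--                         indexes.append((i,j,k))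
--                 elif n == 6:
--                     if (abs(v[0]-i) + abs(v[1]-j) + abs(v[2]-k)) <= 1: #can only move in one direction at a time
--                         indexes.append((i,j,k))
--     if not includev:
--         indexes.remove(v) #I don't want the voxel of interest to be included
--     return indexes
-- ===== SOURCE B (Python) =====
-- def getNNeighIndexes(v, maxlim, n=26, includev=False):
--     '''Table-driven re-implementation: iterate a precomputed offset table and
--     bounds-check each neighbour, instead of a clamped triple-range scan.'''
--     thresholds = {26: 3, 18: 2, 6: 1}
--     indexes = []
--     if n in thresholds:
--         t = thresholds[n]
--         for di in (-1, 0, 1):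
--             for dj in (-1, 0, 1):
--                 for dk in (-1, 0, 1):
--                     if abs(di) + abs(dj) + abs(dk) <= t:
--                         p = (v[0] + di, v[1] + dj, v[2] + dk)
--                         if all(0 <= p[a] < maxlim[a] for a in range(3)):
--                             indexes.append(p)
--     if not includev:
--         indexes.remove(v)
--     return indexes
-- ===== Notes on version B (the rewrite author's own statement) =====
-- stated objective: idiomatic
-- what changed: B replaces A's clamped triple-range scan with an inner Manhattan-distance filter by a table-driven pass: a fixed (-1,0,1)^3 offset table filtered by the connectivity threshold, with an explicit per-axis bounds check on each shifted neighbour.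
import Mathlib
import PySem

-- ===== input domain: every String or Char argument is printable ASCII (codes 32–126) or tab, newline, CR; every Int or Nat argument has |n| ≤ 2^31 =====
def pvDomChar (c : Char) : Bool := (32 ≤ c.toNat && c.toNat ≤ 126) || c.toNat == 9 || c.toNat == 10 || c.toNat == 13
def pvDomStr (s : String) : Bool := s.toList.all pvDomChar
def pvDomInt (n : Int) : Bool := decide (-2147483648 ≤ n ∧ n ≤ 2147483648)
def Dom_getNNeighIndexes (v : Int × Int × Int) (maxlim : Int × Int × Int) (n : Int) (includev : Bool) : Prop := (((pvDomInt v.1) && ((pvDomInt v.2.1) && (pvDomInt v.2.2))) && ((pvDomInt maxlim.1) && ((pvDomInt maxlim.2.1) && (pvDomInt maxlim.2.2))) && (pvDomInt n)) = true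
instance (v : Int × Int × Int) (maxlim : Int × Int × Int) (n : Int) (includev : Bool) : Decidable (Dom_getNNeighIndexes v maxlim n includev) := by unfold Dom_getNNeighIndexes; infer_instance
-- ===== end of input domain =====

-- B replaces A's clamped triple-range scan by a table-driven pass over the (-1,0,1)^3 offset
-- table filtered by the connectivity threshold, with an explicit bounds check per neighbour
-- (objective: idiomatic; same cost).

-- ===== PORT A =====
def getNNeighIndexes (v : Int × Int × Int) (maxlim : Int × Int × Int) (n : Int) (includev : Bool) : List (Int × Int × Int) :=
  let nmin0 := max (v.1 - 1) 0
  let nmin1 := max (v.2.1 - 1) 0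
  let nmin2 := max (v.2.2 - 1) 0
  let nmax0 := min (v.1 + 1) (maxlim.1 - 1)
  let nmax1 := min (v.2.1 + 1) (maxlim.2.1 - 1)
  let nmax2 := min (v.2.2 + 1) (maxlim.2.2 - 1)
  let indexes :=
    (PySem.List.pyRange nmin0 (nmax0 + 1) 1).foldl (fun acc i =>
      (PySem.List.pyRange nmin1 (nmax1 + 1) 1).foldl (fun acc j =>
        (PySem.List.pyRange nmin2 (nmax2 + 1) 1).foldl (fun acc k =>
          if n = 26 then acc ++ [(i, j, k)]
          else if n = 18 then
            (if |v.1 - i| + |v.2.1 - j| + |v.2.2 - k| ≤ 2 then acc ++ [(i, j, k)] else acc)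
          else if n = 6 then
            (if |v.1 - i| + |v.2.1 - j| + |v.2.2 - k| ≤ 1 then acc ++ [(i, j, k)] else acc)
          else acc) acc) acc) []
  -- 'indexes.remove(v)': Python raises ValueError when v ∉ indexes — excluded by Pre_
  if includev then indexes else (PySem.List.remove? indexes v).getD []

-- ===== PORT B =====
def getNNeighIndexes_alt (v : Int × Int × Int) (maxlim : Int × Int × Int) (n : Int) (includev : Bool) : List (Int × Int × Int) :=
  let thresholds : PySem.Dict Int Int := PySem.Dict.ofList [(26, 3), (18, 2), (6, 1)]
  let indexes :=
    match thresholds.get? n with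
    | none => []
    | some t =>
      ([-1, 0, 1] : List Int).foldl (fun acc di =>
        ([-1, 0, 1] : List Int).foldl (fun acc dj =>
          ([-1, 0, 1] : List Int).foldl (fun acc dk =>
            if |di| + |dj| + |dk| ≤ t then
              let p : Int × Int × Int := (v.1 + di, v.2.1 + dj, v.2.2 + dk)
              if (0 ≤ p.1 ∧ p.1 < maxlim.1) ∧ (0 ≤ p.2.1 ∧ p.2.1 < maxlim.2.1) ∧
                 (0 ≤ p.2.2 ∧ p.2.2 < maxlim.2.2) then acc ++ [p] else acc
            else acc) acc) acc) []
  -- same 'indexes.remove(v)' as Source B; raising inputs are excluded by Pre_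
  if includev then indexes else (PySem.List.remove? indexes v).getD []

-- ===== PRECONDITION & SPEC =====
-- Pre_ excludes exactly the inputs where Python A raises ValueError at indexes.remove(v):
-- includev = false with n ∉ {6,18,26} or with v outside the volume (then v is not in the list).
def Pre_getNNeighIndexes (v : Int × Int × Int) (maxlim : Int × Int × Int) (n : Int) (includev : Bool) : Prop :=
  includev = true ∨
    ((n = 6 ∨ n = 18 ∨ n = 26) ∧ 0 ≤ v.1 ∧ v.1 < maxlim.1 ∧ 0 ≤ v.2.1 ∧ v.2.1 < maxlim.2.1 ∧
      0 ≤ v.2.2 ∧ v.2.2 < maxlim.2.2)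
instance (v : Int × Int × Int) (maxlim : Int × Int × Int) (n : Int) (includev : Bool) : Decidable (Pre_getNNeighIndexes v maxlim n includev) := by unfold Pre_getNNeighIndexes; infer_instance

def pvWitness_getNNeighIndexes : (Int × Int × Int) × (Int × Int × Int) × Int × Bool :=
  ((1, 0, 2), (3, 3, 3), 18, false)

def Spec_getNNeighIndexes (v : Int × Int × Int) (maxlim : Int × Int × Int) (n : Int) (includev : Bool) (out : List (Int × Int × Int)) : Prop := out = getNNeighIndexes_alt v maxlim n includev
instance (v : Int × Int × Int) (maxlim : Int × Int × Int) (n : Int) (includev : Bool) (out : List (Int × Int × Int)) : Decidable (Spec_getNNeighIndexes v maxlim n includev out) := by unfold Spec_getNNeighIndexes; infer_instance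

-- ===== CLAIM (what is proved, stated in full; the proofs are below) =====
def Claim_equal_getNNeighIndexes : Prop := ∀ (v : Int × Int × Int) (maxlim : Int × Int × Int) (n : Int) (includev : Bool), Dom_getNNeighIndexes v maxlim n includev → Pre_getNNeighIndexes v maxlim n includev → Spec_getNNeighIndexes v maxlim n includev (getNNeighIndexes v maxlim n includev)

-- ===== LEMMAS AND PROOFS =====

-- helper copies of the two neighbour-list computations (used only by the proofs below)
def coreA (v : Int × Int × Int) (maxlim : Int × Int × Int) (n : Int) : List (Int × Int × Int) :=
    (PySem.List.pyRange (max (v.1 - 1) 0) (min (v.1 + 1) (maxlim.1 - 1) + 1) 1).foldl (fun acc i =>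
      (PySem.List.pyRange (max (v.2.1 - 1) 0) (min (v.2.1 + 1) (maxlim.2.1 - 1) + 1) 1).foldl (fun acc j =>
        (PySem.List.pyRange (max (v.2.2 - 1) 0) (min (v.2.2 + 1) (maxlim.2.2 - 1) + 1) 1).foldl (fun acc k =>
          if n = 26 then acc ++ [(i, j, k)]
          else if n = 18 then
            (if |v.1 - i| + |v.2.1 - j| + |v.2.2 - k| ≤ 2 then acc ++ [(i, j, k)] else acc)
          else if n = 6 then
            (if |v.1 - i| + |v.2.1 - j| + |v.2.2 - k| ≤ 1 then acc ++ [(i, j, k)] else acc)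
          else acc) acc) acc) []

def coreB (v : Int × Int × Int) (maxlim : Int × Int × Int) (n : Int) : List (Int × Int × Int) :=
    match (PySem.Dict.ofList [((26:Int), (3:Int)), (18, 2), (6, 1)]).get? n with
    | none => []
    | some t =>
      ([-1, 0, 1] : List Int).foldl (fun acc di =>
        ([-1, 0, 1] : List Int).foldl (fun acc dj =>
          ([-1, 0, 1] : List Int).foldl (fun acc dk =>
            if |di| + |dj| + |dk| ≤ t then
              let p : Int × Int × Int := (v.1 + di, v.2.1 + dj, v.2.2 + dk)
              if (0 ≤ p.1 ∧ p.1 < maxlim.1) ∧ (0 ≤ p.2.1 ∧ p.2.1 < maxlim.2.1) ∧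
                 (0 ≤ p.2.2 ∧ p.2.2 < maxlim.2.2) then acc ++ [p] else acc
            else acc) acc) acc) []

lemma getNNeighIndexes_eq_core (v maxlim : Int × Int × Int) (n : Int) (includev : Bool) :
    getNNeighIndexes v maxlim n includev
      = if includev then coreA v maxlim n else (PySem.List.remove? (coreA v maxlim n) v).getD [] := rfl

lemma getNNeighIndexes_alt_eq_core (v maxlim : Int × Int × Int) (n : Int) (includev : Bool) :
    getNNeighIndexes_alt v maxlim n includev
      = if includev then coreB v maxlim n else (PySem.List.remove? (coreB v maxlim n) v).getD [] := rfl

-- A's clamped range over one axis is exactly the in-bounds shifts of the offsets -1,0,1.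
lemma axisRange (a m : Int) :
    PySem.List.pyRange (max (a - 1) 0) (min (a + 1) (m - 1) + 1) 1
      = (([-1, 0, 1] : List Int).filter
          (fun d => decide (0 ≤ a + d ∧ a + d < m))).map (fun d => a + d) := by
  by_cases c1 : 0 ≤ a + -1 ∧ a + -1 < m <;>
  by_cases c0 : 0 ≤ a + 0 ∧ a + 0 < m <;>
  by_cases c2 : 0 ≤ a + 1 ∧ a + 1 < m <;>
    simp only [List.filter, List.map, c1, c0, c2, decide_false, and_self, decide_true]
  · rw [show max (a - 1) 0 = a - 1 by omega, show min (a + 1) (m - 1) + 1 = a + 2 by omega,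
      PySem.List.pyRange_one_cons (by omega), show a - 1 + 1 = a by omega,
      PySem.List.pyRange_one_cons (by omega),
      PySem.List.pyRange_one_cons (by omega), show a + 1 + 1 = a + 2 by omega,
      PySem.List.pyRange_one_eq_nil (by omega)]
    norm_num
    omega
  · rw [show max (a - 1) 0 = a - 1 by omega, show min (a + 1) (m - 1) + 1 = a + 1 by omega,
      PySem.List.pyRange_one_cons (by omega), show a - 1 + 1 = a by omega,
      PySem.List.pyRange_one_cons (by omega),
      PySem.List.pyRange_one_eq_nil (by omega)]
    norm_num
    omega
  · omega
  · rw [show max (a - 1) 0 = a - 1 by omega, show min (a + 1) (m - 1) + 1 = a by omega,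
      PySem.List.pyRange_one_cons (by omega), show a - 1 + 1 = a by omega,
      PySem.List.pyRange_one_eq_nil (by omega)]
    norm_num
    omega
  · rw [show max (a - 1) 0 = a by omega, show min (a + 1) (m - 1) + 1 = a + 2 by omega,
      PySem.List.pyRange_one_cons (by omega),
      PySem.List.pyRange_one_cons (by omega), show a + 1 + 1 = a + 2 by omega,
      PySem.List.pyRange_one_eq_nil (by omega)]
    norm_num
  · rw [show max (a - 1) 0 = a by omega, show min (a + 1) (m - 1) + 1 = a + 1 by omega,
      PySem.List.pyRange_one_cons (by omega),
      PySem.List.pyRange_one_eq_nil (by omega)]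
    norm_num
  · rw [show max (a - 1) 0 = a + 1 by omega, show min (a + 1) (m - 1) + 1 = a + 2 by omega,
      PySem.List.pyRange_one_cons (by omega),
      PySem.List.pyRange_one_eq_nil (by omega)]
  · rw [PySem.List.pyRange_one_eq_nil (by omega)]

lemma flatMap_filter {α β : Type} (l : List α) (p : α → Bool) (g : α → List β) :
    (l.filter p).flatMap g = l.flatMap (fun x => if p x then g x else []) := by
  induction l with
  | nil => rfl
  | cons x xs ih => by_cases h : p x <;> simp [h, ih]

lemma core_eq_26 (v maxlim : Int × Int × Int) : coreA v maxlim 26 = coreB v maxlim 26 := by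
  unfold coreA coreB
  rw [axisRange v.1 maxlim.1, axisRange v.2.1 maxlim.2.1, axisRange v.2.2 maxlim.2.2]
  simp only [if_true]
  rw [show (PySem.Dict.ofList [((26:Int), (3:Int)), (18, 2), (6, 1)]).get? 26 = some 3 by decide]
  simp only [← ite_and]
  simp only [PySem.List.foldl_append_singleton_eq_map, PySem.List.foldl_append_ite,
    PySem.List.foldl_append_eq_flatMap, List.flatMap_map, List.filter_map, List.map_map,
    flatMap_filter, List.filter_filter, List.nil_append]
  refine List.flatMap_congr (fun di hdi => ?_)
  have hdi1 : |di| ≤ 1 := by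
    rcases (show di = -1 ∨ di = 0 ∨ di = 1 by simpa using hdi) with rfl | rfl | rfl <;> decide
  by_cases hpa : 0 ≤ v.1 + di ∧ v.1 + di < maxlim.1
  · rw [if_pos (decide_eq_true hpa)]
    refine List.flatMap_congr (fun dj hdj => ?_)
    have hdj1 : |dj| ≤ 1 := by
      rcases (show dj = -1 ∨ dj = 0 ∨ dj = 1 by simpa using hdj) with rfl | rfl | rfl <;> decide
    by_cases hpb : 0 ≤ v.2.1 + dj ∧ v.2.1 + dj < maxlim.2.1
    · rw [if_pos (decide_eq_true hpb)]
      have hfc : List.filter (fun x => decide (0 ≤ v.2.2 + x ∧ v.2.2 + x < maxlim.2.2))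
            ([-1, 0, 1] : List Int)
          = List.filter (fun x =>
              decide (|di| + |dj| + |x| ≤ 3) &&
                (decide (0 ≤ v.1 + di) && decide (v.1 + di < maxlim.1) &&
                  (decide (0 ≤ v.2.1 + dj) && decide (v.2.1 + dj < maxlim.2.1) &&
                    (decide (0 ≤ v.2.2 + x) && decide (v.2.2 + x < maxlim.2.2)))))
            ([-1, 0, 1] : List Int) := by
        refine List.filter_congr (fun dk hdk => ?_)
        have hdk1 : |dk| ≤ 1 := by
          rcases (show dk = -1 ∨ dk = 0 ∨ dk = 1 by simpa using hdk) with rfl | rfl | rfl <;> decide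
        have hth : |di| + |dj| + |dk| ≤ 3 :=
          le_trans (add_le_add (add_le_add hdi1 hdj1) hdk1) (by norm_num)
        simp [hpa.1, hpa.2, hpb.1, hpb.2, hth]
      rw [hfc]
      simp [Function.comp]
    · rw [if_neg (by simpa using hpb)]
      simp [hpb]
  · rw [if_neg (by simpa using hpa)]
    simp [hpa]

lemma core_eq_18 (v maxlim : Int × Int × Int) : coreA v maxlim 18 = coreB v maxlim 18 := by
  unfold coreA coreB
  rw [axisRange v.1 maxlim.1, axisRange v.2.1 maxlim.2.1, axisRange v.2.2 maxlim.2.2]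
  simp only [if_neg (by decide : ¬((18:Int) = 26)), if_true]
  rw [show (PySem.Dict.ofList [((26:Int), (3:Int)), (18, 2), (6, 1)]).get? 18 = some 2 by decide]
  simp only [← ite_and]
  simp only [PySem.List.foldl_append_ite, PySem.List.foldl_append_eq_flatMap,
    List.flatMap_map, List.filter_map, List.map_map, flatMap_filter, List.filter_filter,
    List.nil_append]
  refine List.flatMap_congr (fun di hdi => ?_)
  by_cases hpa : 0 ≤ v.1 + di ∧ v.1 + di < maxlim.1
  · rw [if_pos (decide_eq_true hpa)]
    refine List.flatMap_congr (fun dj hdj => ?_)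
    by_cases hpb : 0 ≤ v.2.1 + dj ∧ v.2.1 + dj < maxlim.2.1
    · rw [if_pos (decide_eq_true hpb)]
      simp [Function.comp, sub_add_cancel_left, abs_neg, hpa, hpb]
    · rw [if_neg (by simpa using hpb)]
      simp [hpb]
  · rw [if_neg (by simpa using hpa)]
    simp [hpa]

lemma core_eq_6 (v maxlim : Int × Int × Int) : coreA v maxlim 6 = coreB v maxlim 6 := by
  unfold coreA coreB
  rw [axisRange v.1 maxlim.1, axisRange v.2.1 maxlim.2.1, axisRange v.2.2 maxlim.2.2]
  simp only [if_neg (by decide : ¬((6:Int) = 26)), if_neg (by decide : ¬((6:Int) = 18)),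
    if_true]
  rw [show (PySem.Dict.ofList [((26:Int), (3:Int)), (18, 2), (6, 1)]).get? 6 = some 1 by decide]
  simp only [← ite_and]
  simp only [PySem.List.foldl_append_ite, PySem.List.foldl_append_eq_flatMap,
    List.flatMap_map, List.filter_map, List.map_map, flatMap_filter, List.filter_filter,
    List.nil_append]
  refine List.flatMap_congr (fun di hdi => ?_)
  by_cases hpa : 0 ≤ v.1 + di ∧ v.1 + di < maxlim.1
  · rw [if_pos (decide_eq_true hpa)]
    refine List.flatMap_congr (fun dj hdj => ?_)
    by_cases hpb : 0 ≤ v.2.1 + dj ∧ v.2.1 + dj < maxlim.2.1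
    · rw [if_pos (decide_eq_true hpb)]
      simp [Function.comp, sub_add_cancel_left, abs_neg, hpa, hpb]
    · rw [if_neg (by simpa using hpb)]
      simp [hpb]
  · rw [if_neg (by simpa using hpa)]
    simp [hpa]

lemma core_eq_other (v maxlim : Int × Int × Int) (n : Int)
    (h26 : n ≠ 26) (h18 : n ≠ 18) (h6 : n ≠ 6) : coreA v maxlim n = coreB v maxlim n := by
  unfold coreA coreB
  have hmk : PySem.Dict.ofList [((26:Int), (3:Int)), (18, 2), (6, 1)]
      = PySem.Dict.mk [(26, 3), (18, 2), (6, 1)] := by decide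
  rw [hmk]
  have hget : (PySem.Dict.mk [((26:Int), (3:Int)), (18, 2), (6, 1)]).get? n = none := by
    simp [PySem.Dict.get?, Ne.symm h26, Ne.symm h18, Ne.symm h6]
  rw [hget]
  simp [h26, h18, h6, List.foldl_fixed]

lemma core_eq (v maxlim : Int × Int × Int) (n : Int) : coreA v maxlim n = coreB v maxlim n := by
  by_cases h26 : n = 26
  · subst h26; exact core_eq_26 v maxlim
  by_cases h18 : n = 18
  · subst h18; exact core_eq_18 v maxlim
  by_cases h6 : n = 6
  · subst h6; exact core_eq_6 v maxlim
  exact core_eq_other v maxlim n h26 h18 h6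

-- ===== VERDICT (by name: the statement is the Claim_ definition above) =====
theorem getNNeighIndexes_spec : Claim_equal_getNNeighIndexes := by
  intro v maxlim n includev _ _
  unfold Spec_getNNeighIndexes
  rw [getNNeighIndexes_eq_core, getNNeighIndexes_alt_eq_core, core_eq]
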